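-- pv_equiv track=rewrite | github.com/raulpenaguiao/project-euler | archive/Euler03__/Euler300/Euler300.py | bondedSides
-- ===== SOURCE A (Python) =====
-- def bondedSides(path):
--     ans = []
--     for i in range(len(path)):
--         for j in range(i-1):
--             boolFlag = False
--             boolFlag = boolFlag or (( path[i][0] == path[j][0] ) and ( path[i][1] == path[j][1] + 1 ))
--             boolFlag = boolFlag or (( path[i][0] == path[j][0] ) and ( path[i][1] == path[j][1] - 1 ))
--             boolFlag = boolFlag or (( path[i][0] == path[j][0] + 1 ) and ( path[i][1] == path[j][1] ))
--             boolFlag = boolFlag or (( path[i][0] == path[j][0] - 1 ) and ( path[i][1] == path[j][1] ))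
--             if(boolFlag):
--                 ans.append(tuple([i, j]))
--     return ans
-- ===== SOURCE B (Python) =====
-- def bondedSides(path):
--     # Index every coordinate once; for each point query its 4 neighbour cells.
--     cells = {}
--     for idx, pt in enumerate(path):
--         cells.setdefault(pt, []).append(idx)
--     ans = []
--     for i, (x, y) in enumerate(path):
--         js = []
--         for q in ((x, y - 1), (x, y + 1), (x - 1, y), (x + 1, y)):
--             for j in cells.get(q, ()):
--                 if j < i - 1:
--                     js.append(j)
--         js.sort()
--         for j in js:
--             ans.append((i, j))
--     return ans
-- ===== Notes on version B (the rewrite author's own statement) =====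
-- stated objective: faster
-- what changed: Replaces A's all-pairs double loop (adjacency test for every pair i,j) by a dictionary mapping each coordinate to its index list, built once; each point then queries only its 4 neighbour cells and sorts the few matching indices.
import Mathlib
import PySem

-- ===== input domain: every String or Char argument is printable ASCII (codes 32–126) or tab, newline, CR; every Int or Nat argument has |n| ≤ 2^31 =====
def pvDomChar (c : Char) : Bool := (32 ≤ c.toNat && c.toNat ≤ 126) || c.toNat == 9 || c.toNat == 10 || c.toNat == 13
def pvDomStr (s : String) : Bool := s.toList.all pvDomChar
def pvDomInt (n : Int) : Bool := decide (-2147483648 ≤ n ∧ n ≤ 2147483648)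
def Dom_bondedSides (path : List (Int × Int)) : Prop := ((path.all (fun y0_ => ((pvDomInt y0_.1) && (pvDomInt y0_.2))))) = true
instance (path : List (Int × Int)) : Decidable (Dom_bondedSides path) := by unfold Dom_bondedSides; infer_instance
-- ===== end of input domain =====

-- B replaces A's all-pairs double loop by a coordinate→indices hash index queried at the
-- 4 neighbour cells of each point (objective: faster, asymptotic).

-- ===== PORT A =====
-- literal transliteration of A; indices i, j are always in range, so the pyGetD default (0,0) is never read
def bondedSides (path : List (Int × Int)) : List (Int × Int) :=
  (PySem.List.pyRange 0 (path.length : Int)).foldl (fun ans i =>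
    (PySem.List.pyRange 0 (i - 1)).foldl (fun ans j =>
      let pi := PySem.List.pyGetD path i (0, 0)
      let pj := PySem.List.pyGetD path j (0, 0)
      let boolFlag := false
      let boolFlag := boolFlag || ((pi.1 == pj.1) && (pi.2 == pj.2 + 1))
      let boolFlag := boolFlag || ((pi.1 == pj.1) && (pi.2 == pj.2 - 1))
      let boolFlag := boolFlag || ((pi.1 == pj.1 + 1) && (pi.2 == pj.2))
      let boolFlag := boolFlag || ((pi.1 == pj.1 - 1) && (pi.2 == pj.2))
      if boolFlag then ans ++ [(i, j)] else ans) ans) []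

-- ===== PORT B =====
-- cells: the coordinate → index-list dictionary B builds once (setdefault(pt, []).append(idx))
def pvCells (path : List (Int × Int)) : PySem.Dict (Int × Int) (List Int) :=
  (PySem.List.enumerate path).foldl
    (fun d ip => d.insert ip.2 (d.getD ip.2 [] ++ [ip.1])) PySem.Dict.empty

def bondedSides_alt (path : List (Int × Int)) : List (Int × Int) :=
  let cells := pvCells path
  (PySem.List.enumerate path).foldl (fun ans ip =>
    let i := ip.1
    let x := ip.2.1
    let y := ip.2.2
    let js := [(x, y - 1), (x, y + 1), (x - 1, y), (x + 1, y)].foldl (fun js q =>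
      (cells.getD q []).foldl (fun js j => if j < i - 1 then js ++ [j] else js) js) []
    let js := PySem.List.sorted js (fun j => j)
    js.foldl (fun ans j => ans ++ [(i, j)]) ans) []

-- ===== PRECONDITION & SPEC =====
def Spec_bondedSides (path : List (Int × Int)) (out : List (Int × Int)) : Prop := out = bondedSides_alt path
instance (path : List (Int × Int)) (out : List (Int × Int)) : Decidable (Spec_bondedSides path out) := by unfold Spec_bondedSides; infer_instance

-- ===== CLAIM (what is proved, stated in full; the proofs are below) =====
def Claim_equal_bondedSides : Prop := ∀ (path : List (Int × Int)), Dom_bondedSides path → Spec_bondedSides path (bondedSides path)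

-- ===== LEMMAS AND PROOFS =====

-- the adjacency test A's boolFlag computes
def pvAdj (p q : Int × Int) : Bool :=
  (((false || ((p.1 == q.1) && (p.2 == q.2 + 1))) || ((p.1 == q.1) && (p.2 == q.2 - 1))) ||
      ((p.1 == q.1 + 1) && (p.2 == q.2))) || ((p.1 == q.1 - 1) && (p.2 == q.2))

lemma pvAdj_iff (p q : Int × Int) :
    pvAdj p q = true ↔ q = (p.1, p.2 - 1) ∨ q = (p.1, p.2 + 1) ∨ q = (p.1 - 1, p.2) ∨ q = (p.1 + 1, p.2) := by
  obtain ⟨a, b⟩ := p; obtain ⟨c, d⟩ := q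
  simp [pvAdj, Prod.ext_iff]
  omega

-- A as a flatMap of filtered ranges
lemma bondedSides_eq_flatMap (path : List (Int × Int)) :
    bondedSides path = (PySem.List.pyRange 0 (path.length : Int)).flatMap (fun i =>
      ((PySem.List.pyRange 0 (i - 1)).filter
          (fun j => pvAdj (PySem.List.pyGetD path i (0, 0)) (PySem.List.pyGetD path j (0, 0)))).map
        (fun j => (i, j))) := by
  show (PySem.List.pyRange 0 (path.length : Int)).foldl (fun ans i =>
      (PySem.List.pyRange 0 (i - 1)).foldl (fun ans j =>
        if pvAdj (PySem.List.pyGetD path i (0, 0)) (PySem.List.pyGetD path j (0, 0)) then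
          ans ++ [(i, j)] else ans) ans) [] = _
  have hinner : ∀ (i : Int) (ans : List (Int × Int)),
      (PySem.List.pyRange 0 (i - 1)).foldl (fun ans j =>
        if pvAdj (PySem.List.pyGetD path i (0, 0)) (PySem.List.pyGetD path j (0, 0)) then
          ans ++ [(i, j)] else ans) ans =
      ans ++ ((PySem.List.pyRange 0 (i - 1)).filter
          (fun j => pvAdj (PySem.List.pyGetD path i (0, 0)) (PySem.List.pyGetD path j (0, 0)))).map
        (fun j => (i, j)) :=
    fun i ans => PySem.List.foldl_append_if _ _ _ _
  simp only [hinner]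
  exact (PySem.List.foldl_append_eq_flatMap _ _ _).trans (by simp)

-- enumerate as a map over range
lemma enumerate_eq_map (path : List (Int × Int)) (s : Int) :
    PySem.List.enumerate path s =
      (List.range path.length).map (fun (k : Nat) => (s + (k : Int), path.getD k (0, 0))) := by
  induction path generalizing s with
  | nil => simp [PySem.List.enumerate]
  | cons p t ih =>
      simp only [PySem.List.enumerate, ih, List.range_succ_eq_map, List.map_cons, List.map_map,
        Function.comp_def, List.length_cons, List.getD_cons_zero, List.getD_cons_succ]
      refine List.cons_eq_cons.mpr ⟨by simp, List.map_congr_left fun k _ => ?_⟩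
      refine Prod.ext ?_ rfl
      push_cast [Nat.succ_eq_add_one]; ring

-- what the dictionary holds: all indices whose point equals q, in increasing index order
lemma pvCells_getD (path : List (Int × Int)) (q : Int × Int) :
    (pvCells path).getD q [] =
      ((PySem.List.enumerate path).filter (fun ip => ip.2 == q)).map Prod.fst := by
  have aux : ∀ (es : List (Int × (Int × Int))) (d : PySem.Dict (Int × Int) (List Int)),
      (es.foldl (fun d ip => d.insert ip.2 (d.getD ip.2 [] ++ [ip.1])) d).getD q [] =
        d.getD q [] ++ (es.filter (fun ip => ip.2 == q)).map Prod.fst := by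
    intro es
    induction es with
    | nil => simp
    | cons ip t ih =>
        intro d
        simp only [List.foldl_cons, ih, List.filter_cons]
        rw [PySem.Dict.getD_insert]
        by_cases h : ip.2 = q
        · simp [h]
        · simp [h, Ne.symm h]
  rw [pvCells, aux]
  simp [PySem.Dict.empty, PySem.Dict.getD, PySem.Dict.get?]

-- the four neighbour cells B queries
def pvNbrs (p : Int × Int) : List (Int × Int) :=
  [(p.1, p.2 - 1), (p.1, p.2 + 1), (p.1 - 1, p.2), (p.1 + 1, p.2)]

-- the candidate index list B collects for entry ip
def pvJs (path : List (Int × Int)) (ip : Int × (Int × Int)) : List Int :=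
  (pvNbrs ip.2).flatMap (fun q => ((pvCells path).getD q []).filter (fun j => j < ip.1 - 1))

-- B as a flatMap of sorted candidate lists
lemma bondedSides_alt_eq_flatMap (path : List (Int × Int)) :
    bondedSides_alt path = (PySem.List.enumerate path).flatMap (fun ip =>
      (PySem.List.sorted (pvJs path ip) (fun j => j)).map (fun j => (ip.1, j))) := by
  unfold bondedSides_alt
  have h1 : ∀ (L : List Int) (i : Int) (js : List Int),
      L.foldl (fun js j => if j < i - 1 then js ++ [j] else js) js =
        js ++ L.filter (fun j => j < i - 1) := by
    intro L i
    induction L with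
    | nil => simp
    | cons a t ih =>
        intro js
        simp only [List.foldl_cons, ih, List.filter_cons]
        by_cases h : a < i - 1 <;> simp [h]
  simp only [h1]
  have h2 : ∀ (ip : Int × (Int × Int)),
      ([(ip.2.1, ip.2.2 - 1), (ip.2.1, ip.2.2 + 1), (ip.2.1 - 1, ip.2.2), (ip.2.1 + 1, ip.2.2)]).foldl
          (fun js q => js ++ ((pvCells path).getD q []).filter (fun j => j < ip.1 - 1)) [] =
        pvJs path ip := by
    intro ip
    rw [PySem.List.foldl_append_eq_flatMap]
    simp [pvJs, pvNbrs]
  simp only [h2]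
  simp only [PySem.List.foldl_append_singleton_eq_map]
  exact (PySem.List.foldl_append_eq_flatMap _ _ _).trans (by simp)

-- what membership in a cell list means
lemma mem_pvCells (path : List (Int × Int)) (q : Int × Int) (j : Int) :
    j ∈ (pvCells path).getD q [] ↔
      ∃ m : Nat, m < path.length ∧ path.getD m (0, 0) = q ∧ j = (m : Int) := by
  rw [pvCells_getD, enumerate_eq_map]
  simp only [List.mem_map, List.mem_filter, List.mem_range]
  constructor
  · rintro ⟨ip, ⟨⟨m, hm, rfl⟩, hq⟩, rfl⟩
    exact ⟨m, hm, by simpa using hq, by simp⟩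
  · rintro ⟨m, hm, hq, rfl⟩
    exact ⟨(0 + (m : Int), path.getD m (0, 0)), ⟨⟨m, hm, rfl⟩, by simpa using hq⟩, by simp⟩

-- pyRange 0 m is strictly increasing
lemma pyRange_zero_pairwise (m : Int) :
    List.Pairwise (· < ·) (PySem.List.pyRange 0 m) := by
  rcases le_or_gt m 0 with h | h
  · have : PySem.List.pyRange 0 m = [] := by
      rw [List.eq_nil_iff_forall_not_mem]
      intro x hx
      rw [PySem.List.mem_pyRange_one] at hx
      omega
    simp [this]
  · obtain ⟨n, rfl⟩ : ∃ n : Nat, m = (n : Int) := ⟨m.toNat, by omega⟩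
    rw [PySem.List.pyRange_zero_natCast]
    exact (List.pairwise_lt_range).map _ (fun a b hab => by exact_mod_cast hab)

-- cell lists are duplicate-free
lemma nodup_pvCells (path : List (Int × Int)) (q : Int × Int) :
    ((pvCells path).getD q []).Nodup := by
  rw [pvCells_getD]
  have hsub : List.Sublist (((PySem.List.enumerate path).filter (fun ip => ip.2 == q)).map Prod.fst)
      ((PySem.List.enumerate path).map Prod.fst) := List.Sublist.map _ List.filter_sublist
  refine hsub.nodup ?_
  rw [enumerate_eq_map]
  simp only [List.map_map, Function.comp_def]
  refine (List.nodup_range).map ?_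
  intro a b hab
  simpa using hab

-- the candidate list is duplicate-free
lemma nodup_pvJs (path : List (Int × Int)) (ip : Int × (Int × Int)) :
    (pvJs path ip).Nodup := by
  rw [pvJs, List.nodup_flatMap]
  constructor
  · intro q _
    exact (nodup_pvCells path q).filter _
  · have hdisj : ∀ q1 q2 : Int × Int, q1 ≠ q2 →
        List.Disjoint (((pvCells path).getD q1 []).filter (fun j => j < ip.1 - 1))
          (((pvCells path).getD q2 []).filter (fun j => j < ip.1 - 1)) := by
      intro q1 q2 hne j h1 h2
      rw [List.mem_filter] at h1 h2
      obtain ⟨m1, _, hq1, hm1⟩ := (mem_pvCells path q1 j).mp h1.1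
      obtain ⟨m2, _, hq2, hm2⟩ := (mem_pvCells path q2 j).mp h2.1
      have hm : m1 = m2 := by exact_mod_cast hm1.symm.trans hm2
      exact hne (by rw [← hq1, ← hq2, hm])
    have hnbrs : List.Pairwise (· ≠ ·) (pvNbrs ip.2) := by
      obtain ⟨x, y⟩ := ip.2
      simp only [pvNbrs]
      refine List.Pairwise.cons ?_ (List.Pairwise.cons ?_ (List.Pairwise.cons ?_
        (List.pairwise_singleton _ _))) <;>
      · intro a ha
        simp only [List.mem_cons, List.not_mem_nil, or_false] at ha
        rcases ha with rfl | rfl | rfl <;> (intro h; rw [Prod.ext_iff] at h; omega)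
    exact hnbrs.imp (fun h => hdisj _ _ h)

-- the per-entry key fact: B's sorted candidate list is exactly A's inner filtered range
lemma sorted_pvJs (path : List (Int × Int)) (k : Nat) (hk : k < path.length) :
    PySem.List.sorted (pvJs path ((k : Int), path.getD k (0, 0))) (fun j => j) =
      (PySem.List.pyRange 0 ((k : Int) - 1)).filter
        (fun j => pvAdj (PySem.List.pyGetD path (k : Int) (0, 0))
          (PySem.List.pyGetD path j (0, 0))) := by
  have hys : List.Pairwise (· < ·)
      ((PySem.List.pyRange 0 ((k : Int) - 1)).filter
        (fun j => pvAdj (PySem.List.pyGetD path (k : Int) (0, 0))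
          (PySem.List.pyGetD path j (0, 0)))) :=
    List.Pairwise.sublist List.filter_sublist (pyRange_zero_pairwise _)
  apply PySem.List.sorted_eq_of_perm_of_pairwise_lt _ _ _ _ hys
  · -- the filtered range is a permutation of the candidate list
    refine (List.perm_ext_iff_of_nodup (hys.imp ne_of_lt) (nodup_pvJs path _)).mpr ?_
    intro j
    rw [List.mem_filter, PySem.List.mem_pyRange_one]
    rw [pvJs]
    simp only [List.mem_flatMap, List.mem_filter]
    constructor
    · rintro ⟨⟨h0, hj⟩, hadj⟩
      obtain ⟨m, rfl⟩ : ∃ m : Nat, j = (m : Int) := ⟨j.toNat, by omega⟩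
      have hmn : m < path.length := by omega
      rw [PySem.List.pyGetD_natCast, PySem.List.pyGetD_natCast] at hadj
      rw [pvAdj_iff] at hadj
      refine ⟨path.getD m (0, 0), ?_, (mem_pvCells path _ _).mpr ⟨m, hmn, rfl, rfl⟩, by simpa using hj⟩
      simp only [pvNbrs, List.mem_cons, List.not_mem_nil, or_false]
      exact hadj
    · rintro ⟨q, hq, hmem, hlt⟩

      obtain ⟨m, hmn, hqm, rfl⟩ := (mem_pvCells path q _).mp hmem
      have hlt' : (m : Int) < (k : Int) - 1 := by simpa using hlt
      refine ⟨⟨Int.natCast_nonneg m, hlt'⟩, ?_⟩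
      rw [PySem.List.pyGetD_natCast, PySem.List.pyGetD_natCast, pvAdj_iff]
      rw [hqm]
      simp only [pvNbrs, List.mem_cons] at hq
      tauto

-- ===== VERDICT (by name: the statement is the Claim_ definition above) =====
theorem bondedSides_spec : Claim_equal_bondedSides := by
  intro path _
  unfold Spec_bondedSides
  rw [bondedSides_eq_flatMap, bondedSides_alt_eq_flatMap]
  rw [PySem.List.pyRange_zero_natCast, enumerate_eq_map]
  rw [List.flatMap_map, List.flatMap_map]
  simp only [zero_add]
  apply List.flatMap_congr
  intro k hk
  rw [List.mem_range] at hk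
  rw [sorted_pvJs path k hk]
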